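-- pv_equiv track=rewrite | github.com/SACHINBALHARA/AI-powered-chatbot | src/components/advanced_llm_handler.py | _enhance_response
-- ===== SOURCE A (Python) =====
-- from typing import List, Dict, Iterator, Optional, Any
--
-- def _enhance_response(response: str, contexts: List[str], query: str) -> str:
--     query_words = set(query.lower().split())
--     total_matches = 0
--     for context in contexts:
--         context_words = set(context.lower().split())
--         total_matches += len(query_words.intersection(context_words))
--
--     confidence = min(100, total_matches * 20)
--
--     if confidence < 30:
--         response += "\n\n*Note: Limited relevant information found in the provided context.*"
--     elif confidence > 80:
--         response += "\n\n*This answer is based on comprehensive information from the provided context.*"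
--
--     return response
-- ===== SOURCE B (Python) =====
-- def _enhance_response(response, contexts, query):
--     # Document-frequency table: each context contributes each of its unique words once.
--     freq = {}
--     for context in contexts:
--         for w in set(context.lower().split()):
--             freq[w] = freq.get(w, 0) + 1
--     total_matches = sum(freq.get(w, 0) for w in set(query.lower().split()))
--
--     confidence = min(100, total_matches * 20)
--
--     if confidence < 30:
--         response += "\n\n*Note: Limited relevant information found in the provided context.*"
--     elif confidence > 80:
--         response += "\n\n*This answer is based on comprehensive information from the provided context.*"
--
--     return response
-- ===== Notes on version B (the rewrite author's own statement) =====
-- stated objective: alternative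
-- what changed: Replaces the per-context set-intersection loop by a document-frequency dict built in one pass over the contexts, after which total_matches is a single lookup-sum over the query word-set.
import Mathlib
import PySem

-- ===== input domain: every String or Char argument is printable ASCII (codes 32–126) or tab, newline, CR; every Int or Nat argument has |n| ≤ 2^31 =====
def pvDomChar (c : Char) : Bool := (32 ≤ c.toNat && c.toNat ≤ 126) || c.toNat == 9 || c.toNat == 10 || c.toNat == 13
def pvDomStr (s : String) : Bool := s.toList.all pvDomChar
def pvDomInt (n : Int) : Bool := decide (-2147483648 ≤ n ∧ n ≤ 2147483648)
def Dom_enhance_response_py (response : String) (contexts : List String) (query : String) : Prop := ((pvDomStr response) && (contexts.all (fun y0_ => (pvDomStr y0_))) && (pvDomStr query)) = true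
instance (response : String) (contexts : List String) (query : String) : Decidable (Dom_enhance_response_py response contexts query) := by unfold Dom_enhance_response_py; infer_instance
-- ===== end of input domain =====

-- B replaces the per-context set-intersection loop by a document-frequency dict built once,
-- then sums the query words' frequencies (alternative decomposition, same result).



-- ===== PORT A =====
def enhance_response_py (response : String) (contexts : List String) (query : String) : String :=
  let query_words : PySem.Set String := PySem.Set.ofList (PySem.Str.split₀ (PySem.Str.lower query))
  let total_matches : Int := contexts.foldl (fun acc context =>
    let context_words : PySem.Set String := PySem.Set.ofList (PySem.Str.split₀ (PySem.Str.lower context))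
    acc + PySem.Set.len (PySem.Set.inter query_words context_words)) 0
  let confidence : Int := min 100 (total_matches * 20)
  if confidence < 30 then
    response ++ "\n\n*Note: Limited relevant information found in the provided context.*"
  else if confidence > 80 then
    response ++ "\n\n*This answer is based on comprehensive information from the provided context.*"
  else
    response

-- ===== PORT B =====
def enhance_response_py_alt (response : String) (contexts : List String) (query : String) : String :=
  let freq : PySem.Dict String Int := contexts.foldl (fun d context =>
    (PySem.Set.ofList (PySem.Str.split₀ (PySem.Str.lower context))).foldl
      (fun d w => d.modify w 0 (· + 1)) d) PySem.Dict.empty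
  let total_matches : Int :=
    ((PySem.Set.ofList (PySem.Str.split₀ (PySem.Str.lower query))).map
      (fun w => freq.getD w 0)).sum
  let confidence : Int := min 100 (total_matches * 20)
  if confidence < 30 then
    response ++ "\n\n*Note: Limited relevant information found in the provided context.*"
  else if confidence > 80 then
    response ++ "\n\n*This answer is based on comprehensive information from the provided context.*"
  else
    response

-- ===== PRECONDITION & SPEC =====
def Spec_enhance_response_py (response : String) (contexts : List String) (query : String) (out : String) : Prop := out = enhance_response_py_alt response contexts query
instance (response : String) (contexts : List String) (query : String) (out : String) : Decidable (Spec_enhance_response_py response contexts query out) := by unfold Spec_enhance_response_py; infer_instance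

-- ===== CLAIM (what is proved, stated in full; the proofs are below) =====
def Claim_equal_enhance_response_py : Prop := ∀ (response : String) (contexts : List String) (query : String), Dom_enhance_response_py response contexts query → Spec_enhance_response_py response contexts query (enhance_response_py response contexts query)

-- ===== LEMMAS AND PROOFS =====

-- the unique words of one context/query, as both ports compute them
def pvWords (s : String) : PySem.Set String :=
  PySem.Set.ofList (PySem.Str.split₀ (PySem.Str.lower s))

-- B's frequency table at key w counts the contexts whose word-set contains w
theorem pv_freq_getD (contexts : List String) (d : PySem.Dict String Int) (w : String) :
    (contexts.foldl (fun d context =>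
        (pvWords context).foldl (fun d w => d.modify w 0 (· + 1)) d) d).getD w 0
      = d.getD w 0 + (contexts.map (fun c => ((pvWords c).count w : Int))).sum := by
  induction contexts generalizing d with
  | nil => simp
  | cons c cs ih =>
    simp only [List.foldl_cons, List.map_cons, List.sum_cons]
    rw [ih, PySem.Dict.getD_foldl_modify_add_one]
    ring

-- on a nodup list, count is a membership indicator
theorem pv_count_nodup {l : List String} (h : l.Nodup) (w : String) :
    ((l.count w : Nat) : Int) = if l.contains w then 1 else 0 := by
  by_cases hm : w ∈ l
  · simp [List.count_eq_one_of_mem h hm, hm]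
  · simp [List.count_eq_zero_of_not_mem hm, hm]

-- one intersection size as a sum of indicators over the query word-set
theorem pv_inter_len (qs t : PySem.Set String) :
    PySem.Set.len (PySem.Set.inter qs t)
      = (qs.map (fun w => if t.contains w then (1 : Int) else 0)).sum := by
  rw [PySem.List.sum_map_ite_one_zero]
  simp only [PySem.Set.len, PySem.Set.inter, List.countP_eq_length_filter]

-- swapping a double sum over two lists
theorem pv_sum_comm {α β : Type} (l1 : List α) (l2 : List β) (f : α → β → Int) :
    (l1.map (fun a => (l2.map (f a)).sum)).sum
      = (l2.map (fun b => (l1.map (fun a => f a b)).sum)).sum := by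
  induction l1 with
  | nil => simp
  | cons a l ih =>
    simp only [List.map_cons, List.sum_cons, ih]
    rw [← PySem.List.sum_map_add_int]

theorem pv_total_eq (contexts : List String) (query : String) :
    (contexts.foldl (fun acc context =>
        acc + PySem.Set.len (PySem.Set.inter (pvWords query) (pvWords context))) 0)
      = ((pvWords query).map (fun w =>
          (contexts.foldl (fun d context =>
            (pvWords context).foldl (fun d w => d.modify w 0 (· + 1)) d)
            PySem.Dict.empty).getD w 0)).sum := by
  rw [PySem.List.foldl_add]
  have hB : ∀ w, (contexts.foldl (fun d context =>
      (pvWords context).foldl (fun d w => d.modify w 0 (· + 1)) d)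
      PySem.Dict.empty).getD w 0
      = (contexts.map (fun c => ((pvWords c).count w : Int))).sum := by
    intro w
    rw [pv_freq_getD]
    simp [PySem.Dict.empty, PySem.Dict.getD, PySem.Dict.get?]
  calc 0 + (contexts.map (fun c =>
          PySem.Set.len (PySem.Set.inter (pvWords query) (pvWords c)))).sum
      = (contexts.map (fun c => ((pvWords query).map
          (fun w => if (pvWords c).contains w then (1 : Int) else 0)).sum)).sum := by
          simp only [zero_add, pv_inter_len]
    _ = ((pvWords query).map (fun w => (contexts.map
          (fun c => if (pvWords c).contains w then (1 : Int) else 0)).sum)).sum := by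
          exact pv_sum_comm contexts (pvWords query) _
    _ = ((pvWords query).map (fun w => (contexts.map
          (fun c => ((pvWords c).count w : Int))).sum)).sum := by
          apply congrArg
          apply List.map_congr_left
          intro w _
          apply congrArg
          apply List.map_congr_left
          intro c _
          exact (pv_count_nodup (PySem.Set.nodup_ofList _) w).symm
    _ = ((pvWords query).map (fun w =>
          (contexts.foldl (fun d context =>
            (pvWords context).foldl (fun d w => d.modify w 0 (· + 1)) d)
            PySem.Dict.empty).getD w 0)).sum := by
          simp only [hB]

-- ===== VERDICT (by name: the statement is the Claim_ definition above) =====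
theorem enhance_response_py_spec : Claim_equal_enhance_response_py := by
  intro response contexts query _
  show enhance_response_py response contexts query = enhance_response_py_alt response contexts query
  have h := pv_total_eq contexts query
  simp only [pvWords] at h
  simp only [enhance_response_py, enhance_response_py_alt, h]
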